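-- pv_equiv track=rewrite | github.com/f121476536/nccu_c01_dev | C01_main.py | find_char_position_in_string
-- ===== SOURCE A (Python) =====
-- from typing import List, Dict
--
-- def find_char_position_in_string(string: str, char: str) -> List[int]:
--     position = []
--     n = 0
--     while(n != -1):
--         n = string.find(char, n + 1)
--         if(n != -1):
--             position.append(n)
--     return position
-- ===== SOURCE B (Python) =====
-- from typing import List, Dict
--
-- def find_char_position_in_string(string: str, char: str) -> List[int]:
--     return [i for i in range(1, len(string) + 1) if string.startswith(char, i)]
-- ===== Notes on version B (the rewrite author's own statement) =====
-- stated objective: simpler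
-- what changed: Replaced the while-loop around str.find with a single comprehension over candidate start indices 1..len(string) tested with str.startswith.
import Mathlib
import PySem

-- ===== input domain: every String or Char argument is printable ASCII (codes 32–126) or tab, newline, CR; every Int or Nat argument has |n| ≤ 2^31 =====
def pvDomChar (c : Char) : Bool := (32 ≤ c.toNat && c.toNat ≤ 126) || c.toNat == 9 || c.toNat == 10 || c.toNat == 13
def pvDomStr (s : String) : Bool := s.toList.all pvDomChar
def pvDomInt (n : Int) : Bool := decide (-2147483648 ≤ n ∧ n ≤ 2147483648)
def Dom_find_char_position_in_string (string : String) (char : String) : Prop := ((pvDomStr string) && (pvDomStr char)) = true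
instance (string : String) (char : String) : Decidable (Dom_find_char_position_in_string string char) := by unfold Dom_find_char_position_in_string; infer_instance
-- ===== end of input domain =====

-- B replaces A's while/str.find search loop by a single comprehension over candidate
-- start indices 1..len(string) tested with str.startswith (objective: simpler).


-- ===== PORT A =====
-- termination helper for A's while loop: s.find(char, n+1) with start past the end is -1
theorem pvFindFrom_past (s c : List Char) (k : Nat) (h : s.length < k) :
    PySem.Chars.findFrom s c (k : Int) none = -1 := by
  simp [PySem.Chars.findFrom]
  intro h1 _
  omega

-- termination helper: a successful find lands strictly beyond n and within the string
theorem pvFindFrom_bounds (s c : List Char) (n : Nat)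
    (h : PySem.Chars.findFrom s c ((n : Int) + 1) none ≠ -1) :
    n < (PySem.Chars.findFrom s c ((n : Int) + 1) none).toNat ∧
      (PySem.Chars.findFrom s c ((n : Int) + 1) none).toNat ≤ s.length := by
  have hcast : ((n : Int) + 1) = ((n + 1 : Nat) : Int) := by push_cast; ring
  rw [hcast] at h ⊢
  by_cases hn : n + 1 ≤ s.length
  · obtain ⟨h1, _, _⟩ := PySem.Chars.findFrom_natCast_spec s c (n + 1) hn h
    have h2 := PySem.Chars.findFrom_natCast s c (n + 1) hn
    rw [h2] at h h1 ⊢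
    have h3 := PySem.Chars.find_le_length (List.drop (n + 1) s) c
    simp only [List.length_drop] at h3
    split at h
    · exact absurd rfl h
    · constructor <;> omega
  · exact absurd (pvFindFrom_past s c (n + 1) (by omega)) h

-- the while-loop of A: n is the current index; n = string.find(char, n+1); append until -1
def pvALoop (string : String) (char : String) (n : Nat) : List Int :=
  if hr : PySem.Str.findFrom string char ((n : Int) + 1) none = -1 then []
  else (PySem.Str.findFrom string char ((n : Int) + 1) none) ::
        pvALoop string char (PySem.Str.findFrom string char ((n : Int) + 1) none).toNat
termination_by string.toList.length + 1 - n
decreasing_by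
  simp only [PySem.Str.findFrom_eq] at hr ⊢
  have := pvFindFrom_bounds string.toList char.toList n hr
  omega

def find_char_position_in_string (string : String) (char : String) : List Int :=
  pvALoop string char 0

-- ===== PORT B =====
-- hand port of str.startswith(p, i) for a nonnegative start i (exact there: CPython
-- returns False when i exceeds len(s), otherwise compares at position i)
def pvStartswithFrom (s p : List Char) (i : Nat) : Bool :=
  if i ≤ s.length then PySem.Chars.startswith (List.drop i s) p else false

def find_char_position_in_string_alt (string : String) (char : String) : List Int :=
  (PySem.List.pyRange 1 ((PySem.Str.len string : Int) + 1) 1).filter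
    (fun i => pvStartswithFrom string.toList char.toList i.toNat)

-- ===== PRECONDITION & SPEC =====
def Spec_find_char_position_in_string (string : String) (char : String) (out : List Int) : Prop := out = find_char_position_in_string_alt string char
instance (string : String) (char : String) (out : List Int) : Decidable (Spec_find_char_position_in_string string char out) := by unfold Spec_find_char_position_in_string; infer_instance

-- ===== CLAIM (what is proved, stated in full; the proofs are below) =====
def Claim_equal_find_char_position_in_string : Prop := ∀ (string : String) (char : String), Dom_find_char_position_in_string string char → Spec_find_char_position_in_string string char (find_char_position_in_string string char)

-- ===== LEMMAS AND PROOFS =====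

theorem pvInfix_iff (c x : List Char) : c <:+: x ↔ ∃ j, c <+: List.drop j x := by
  rw [← PySem.Chars.isIn_iff_infix, ← PySem.Chars.exists_prefix_drop_iff_isIn]

-- if char starts right at position k, find from k returns k
theorem pvFindFrom_here (s c : List Char) (k : Nat) (hk : k ≤ s.length)
    (h : c <+: List.drop k s) :
    PySem.Chars.findFrom s c (k : Int) none = (k : Int) := by
  have h0 : PySem.Chars.find (List.drop k s) c = 0 := by
    have hnn : 0 ≤ PySem.Chars.find (List.drop k s) c :=
      (PySem.Chars.find_nonneg_iff _ _).mpr h.isInfix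
    obtain ⟨_, hmin⟩ := PySem.Chars.find_spec hnn
    by_contra hne
    have hpos : 0 < (PySem.Chars.find (List.drop k s) c).toNat := by omega
    exact hmin 0 hpos (by simpa using h)
  rw [PySem.Chars.findFrom_natCast s c k hk, h0]
  simp

-- if char does not start at position k, find from k equals find from k+1
theorem pvFindFrom_succ (s c : List Char) (k : Nat) (hk : k ≤ s.length)
    (h : ¬ c <+: List.drop k s) :
    PySem.Chars.findFrom s c (k : Int) none = PySem.Chars.findFrom s c ((k + 1 : Nat) : Int) none := by
  by_cases hk1 : k + 1 ≤ s.length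
  · by_cases hr2 : PySem.Chars.findFrom s c ((k + 1 : Nat) : Int) none = -1
    · rw [hr2]
      rw [PySem.Chars.findFrom_natCast_eq_neg_one_iff s c (k + 1) hk1] at hr2
      rw [PySem.Chars.findFrom_natCast_eq_neg_one_iff s c k hk]
      intro hinf
      apply hr2
      rw [pvInfix_iff] at hinf ⊢
      obtain ⟨j, hj⟩ := hinf
      rw [List.drop_drop] at hj
      rcases Nat.eq_zero_or_pos j with hj0 | hj0
      · exact absurd (by simpa [hj0] using hj) h
      · refine ⟨j - 1, ?_⟩
        rw [List.drop_drop]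
        have he : k + 1 + (j - 1) = k + j := by omega
        rw [he]
        exact hj
    · obtain ⟨hle2, hpre2, hmin2⟩ := PySem.Chars.findFrom_natCast_spec s c (k + 1) hk1 hr2
      set r2 := PySem.Chars.findFrom s c ((k + 1 : Nat) : Int) none with hr2def
      have hr2nn : 0 ≤ r2 := le_trans (by positivity) hle2
      have hr1 : PySem.Chars.findFrom s c (k : Int) none ≠ -1 := by
        rw [Ne, PySem.Chars.findFrom_natCast_eq_neg_one_iff s c k hk]
        push Not
        rw [pvInfix_iff]
        refine ⟨r2.toNat - k, ?_⟩
        rw [List.drop_drop]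
        have he : k + (r2.toNat - k) = r2.toNat := by omega
        rw [he]
        exact hpre2
      obtain ⟨hle1, hpre1, hmin1⟩ := PySem.Chars.findFrom_natCast_spec s c k hk hr1
      set r1 := PySem.Chars.findFrom s c (k : Int) none with hr1def
      have hr1nn : 0 ≤ r1 := le_trans (by positivity) hle1
      have hne : r1.toNat ≠ k := by
        intro heq
        exact h (by simpa [heq] using hpre1)
      have h12 : ¬ r1.toNat < r2.toNat := fun hlt => hmin2 r1.toNat (by omega) hlt hpre1
      have h21 : ¬ r2.toNat < r1.toNat := fun hlt => hmin1 r2.toNat (by omega) hlt hpre2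
      omega
  · have hk' : k = s.length := by omega
    have hc : c ≠ [] := by
      intro hc0
      exact h (by simp [hc0])
    rw [pvFindFrom_past s c (k + 1) (by omega)]
    rw [PySem.Chars.findFrom_natCast_eq_neg_one_iff s c k hk]
    intro hinf
    rw [hk', List.drop_length] at hinf
    exact hc (List.eq_nil_of_infix_nil hinf)

-- the invariant: from index n, A's loop produces exactly the positions in (n, len]
-- at which char starts
theorem pvALoop_eq (string char : String) (n : Nat) (hn : n ≤ string.toList.length) :
    pvALoop string char n =
      ((List.range' (n + 1) (string.toList.length - n)).filter
        (fun k => pvStartswithFrom string.toList char.toList k)).map (fun k : Nat => (k : Int)) := by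
  by_cases hlt : n < string.toList.length
  · have hsz : string.toList.length - n = (string.toList.length - (n + 1)) + 1 := by omega
    rw [hsz, List.range'_succ, List.filter_cons]
    by_cases hpre : char.toList <+: List.drop (n + 1) string.toList
    · have hr : PySem.Str.findFrom string char ((n : Int) + 1) none = ((n + 1 : Nat) : Int) := by
        rw [PySem.Str.findFrom_eq]
        have he : ((n : Int) + 1) = ((n + 1 : Nat) : Int) := by push_cast; ring
        rw [he]
        exact pvFindFrom_here string.toList char.toList (n + 1) (by omega) hpre
      have hps : pvStartswithFrom string.toList char.toList (n + 1) = true := by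
        simp only [pvStartswithFrom, if_pos (by omega : n + 1 ≤ string.toList.length)]
        exact (PySem.Chars.startswith_iff _ _).mpr hpre
      rw [pvALoop.eq_def, hr, dif_neg (by omega : ¬ ((n + 1 : Nat) : Int) = -1), hps]
      rw [if_pos rfl, Int.toNat_natCast, List.map_cons]
      rw [pvALoop_eq string char (n + 1) (by omega)]
    · have hps : pvStartswithFrom string.toList char.toList (n + 1) = false := by
        simp only [pvStartswithFrom, if_pos (by omega : n + 1 ≤ string.toList.length),
          ← Bool.not_eq_true, PySem.Chars.startswith_iff]
        exact hpre
      rw [hps, if_neg (by simp)]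
      have hr : PySem.Str.findFrom string char ((n : Int) + 1) none =
          PySem.Str.findFrom string char (((n + 1 : Nat) : Int) + 1) none := by
        simp only [PySem.Str.findFrom_eq]
        have e1 : ((n : Int) + 1) = ((n + 1 : Nat) : Int) := by push_cast; ring
        have e2 : (((n + 1 : Nat) : Int) + 1) = ((n + 2 : Nat) : Int) := by push_cast; ring
        rw [e1, e2]
        exact pvFindFrom_succ string.toList char.toList (n + 1) (by omega) hpre
      have hA : pvALoop string char n = pvALoop string char (n + 1) := by
        rw [pvALoop.eq_def]
        conv_rhs => rw [pvALoop.eq_def]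
        rw [hr]
      rw [hA, pvALoop_eq string char (n + 1) (by omega)]
  · have hn' : n = string.toList.length := by omega
    have hr : PySem.Str.findFrom string char ((n : Int) + 1) none = -1 := by
      rw [PySem.Str.findFrom_eq]
      have he : ((n : Int) + 1) = ((n + 1 : Nat) : Int) := by push_cast; ring
      rw [he]
      exact pvFindFrom_past string.toList char.toList (n + 1) (by omega)
    rw [pvALoop.eq_def, hr, dif_pos rfl]
    simp [hn']
termination_by string.toList.length - n
decreasing_by all_goals omega

-- pyRange over natural bounds as a mapped List.range'
theorem pvPyRange_natCast (a b : Nat) :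
    PySem.List.pyRange (a : Int) (b : Int) 1 = (List.range' a (b - a)).map (fun k : Nat => (k : Int)) := by
  rw [PySem.List.pyRange_one, List.range'_eq_map_range, List.map_map]
  have he : ((b : Int) - (a : Int)).toNat = b - a := by omega
  rw [he]
  refine List.map_congr_left ?_
  intro k _
  simp

-- ===== VERDICT (by name: the statement is the Claim_ definition above) =====
theorem find_char_position_in_string_spec : Claim_equal_find_char_position_in_string := by
  intro string char _
  unfold Spec_find_char_position_in_string find_char_position_in_string find_char_position_in_string_alt
  rw [pvALoop_eq string char 0 (by omega)]
  have hlen : ((PySem.Str.len string : Int) + 1) = ((string.toList.length + 1 : Nat) : Int) := by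
    simp [PySem.Str.len]
  have h1 := pvPyRange_natCast 1 (string.toList.length + 1)
  rw [Nat.cast_one] at h1
  rw [hlen, h1]
  rw [List.filter_map]
  simp only [Function.comp_def, Int.toNat_natCast]
  norm_num
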